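-- pv_equiv track=rewrite | github.com/mhilmiasyrofi/product-attribute-extraction | helper.py | remove_hex
-- ===== SOURCE A (Python) =====
-- def remove_hex(text):
--     """
--     Remove Hex
--     Example:
--     "\xe3\x80\x90Ramadan\xe3\x80\x91Dompet wanita multi-fungsi gesper dompet multi-card"
--     """
--     res = []
--     i = 0
--     while i < len(text):
--         if text[i] == "\\" and i+1 < len(text) and text[i+1] == "x":
--             i += 3
--             res.append(" ")
--         else:
--             res.append(text[i])
--         i += 1
--     # text = text.encode('utf-8')
--     # text = text.encode('ascii', 'ignore')
--     # text = text.encode('ascii', errors='ignore')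
--     # text = unicode(text)
--     # text = re.sub(r'[^\x00-\x7f]', r'', text)
--     # filter(lambda x: x in printable, text)
--     return "".join(res)
-- ===== SOURCE B (Python) =====
-- import re
--
-- def remove_hex(text):
--     return re.sub(r'\\x.{0,2}', ' ', text, flags=re.DOTALL)
-- ===== Notes on version B (the rewrite author's own statement) =====
-- stated objective: idiomatic
-- what changed: Replaced the manual index state machine (while loop with explicit index skipping and list append/join) with a single regex substitution that rewrites each backslash-x escape plus up to two following characters to a space.
import Mathlib
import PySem

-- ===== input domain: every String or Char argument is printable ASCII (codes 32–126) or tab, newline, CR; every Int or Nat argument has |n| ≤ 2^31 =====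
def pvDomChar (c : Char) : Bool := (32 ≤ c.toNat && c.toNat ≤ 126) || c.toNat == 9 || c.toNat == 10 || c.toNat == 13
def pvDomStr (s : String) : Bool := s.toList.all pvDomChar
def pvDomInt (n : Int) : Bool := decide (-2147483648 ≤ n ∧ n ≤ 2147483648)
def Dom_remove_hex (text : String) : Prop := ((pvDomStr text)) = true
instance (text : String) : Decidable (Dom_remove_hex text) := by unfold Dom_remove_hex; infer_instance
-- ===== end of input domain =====

-- B replaces A's manual index state machine by one regex substitution (same result; objective: idiomatic).

-- ===== PORT A =====
-- A's while loop over index i, appending to res; res is the accumulator, joined at the end.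
def remove_hex_go (cs : List Char) (i : Nat) (res : List Char) : List Char :=
  if i < cs.length then
    if cs.getD i ' ' = '\\' ∧ i + 1 < cs.length ∧ cs.getD (i+1) ' ' = 'x' then
      -- i += 3; res.append(" "); i += 1
      remove_hex_go cs (i+4) (res ++ [' '])
    else
      remove_hex_go cs (i+1) (res ++ [cs.getD i ' '])
  else res
termination_by cs.length - i

def remove_hex (text : String) : String := String.ofList (remove_hex_go text.toList 0 [])

-- ===== PORT B =====
-- re.sub(r'\\x.{0,2}', ' ', text, flags=re.DOTALL): leftmost non-overlapping matches of
-- '\x' plus up to two arbitrary chars become one space; everything else is copied.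
def remove_hex_sub : List Char → List Char
  | [] => []
  | c :: rest =>
    if c = '\\' ∧ rest.head? = some 'x' then
      ' ' :: remove_hex_sub (rest.tail.drop 2)   -- match = '\x' + greedily up to 2 chars
    else
      c :: remove_hex_sub rest
termination_by l => l.length
decreasing_by
  · simp only [List.length_drop, List.length_tail, List.length_cons]; omega
  · simp

def remove_hex_alt (text : String) : String := String.ofList (remove_hex_sub text.toList)

-- ===== PRECONDITION & SPEC =====
def Spec_remove_hex (text : String) (out : String) : Prop := out = remove_hex_alt text
instance (text : String) (out : String) : Decidable (Spec_remove_hex text out) := by unfold Spec_remove_hex; infer_instance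

-- ===== CLAIM (what is proved, stated in full; the proofs are below) =====
def Claim_equal_remove_hex : Prop := ∀ (text : String), Dom_remove_hex text → Spec_remove_hex text (remove_hex text)

-- ===== LEMMAS AND PROOFS =====
theorem remove_hex_go_eq (cs : List Char) (i : Nat) (res : List Char) :
    remove_hex_go cs i res = res ++ remove_hex_sub (cs.drop i) := by
  fun_induction remove_hex_go cs i res with
  | case1 i res hlt hm ih =>
    obtain ⟨h0, h1, h2⟩ := hm
    rw [ih]
    rw [List.drop_eq_getElem_cons hlt, List.drop_eq_getElem_cons h1] at *
    have e0 : cs[i] = '\\' := by simpa [List.getD, List.getElem?_eq_getElem hlt] using h0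
    have e1 : cs[i+1] = 'x' := by simpa [List.getD, List.getElem?_eq_getElem h1] using h2
    rw [remove_hex_sub, if_pos (by simp [e0, e1])]
    simp [List.drop_drop]
  | case2 i res hlt hm ih =>
    rw [ih]
    rw [List.drop_eq_getElem_cons hlt]
    rw [remove_hex_sub, if_neg]
    · simp [List.getD, List.getElem?_eq_getElem hlt]
    · intro ⟨h0, h1⟩
      apply hm
      have hd : (cs.drop (i+1)).head? = cs[i+1]? := List.head?_drop.trans (by simp)
      rw [hd] at h1
      have h1' : i + 1 < cs.length := by
        by_contra hc
        rw [List.getElem?_eq_none (by omega)] at h1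
        simp at h1
      refine ⟨by simp [List.getD, List.getElem?_eq_getElem hlt, h0], h1', ?_⟩
      simpa [List.getD, List.getElem?_eq_getElem h1'] using h1
  | case3 i res hge =>
    rw [List.drop_eq_nil_of_le (by omega), remove_hex_sub]
    simp

-- ===== VERDICT (by name: the statement is the Claim_ definition above) =====
theorem remove_hex_spec : Claim_equal_remove_hex := by
  intro text _
  unfold Spec_remove_hex remove_hex remove_hex_alt
  rw [remove_hex_go_eq]
  simp
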